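-- pv_equiv track=rewrite | github.com/TeachBooks/Useful_python_code | stripper.py | strip_and_replace
-- ===== SOURCE A (Python) =====
-- MARK_START = "### begin-solution"
--
-- MARK_END   = "### end-solution"
--
-- PLACEHOLDER = "#your code/answer\n"
--
-- def strip_and_replace(src: str) -> str:
--     out_lines = []
--     in_block = False
--
--     for line in src.splitlines(keepends=True):
--         if not in_block and MARK_START in line:
--             in_block = True
--             out_lines.append(PLACEHOLDER)
--             continue
--
--         if in_block and MARK_END in line:
--             in_block = False
--             continue
--
--         if not in_block:
--             out_lines.append(line)
--
--     return "".join(out_lines)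
-- ===== SOURCE B (Python) =====
-- MARK_START = "### begin-solution"
--
-- MARK_END   = "### end-solution"
--
-- PLACEHOLDER = "#your code/answer\n"
--
-- def strip_and_replace(src: str) -> str:
--     out = []
--     it = iter(src.splitlines(keepends=True))
--     for line in it:
--         if MARK_START in line:
--             out.append(PLACEHOLDER)
--             for inner in it:
--                 if MARK_END in inner:
--                     break
--         else:
--             out.append(line)
--     return "".join(out)
-- ===== Notes on version B (the rewrite author's own statement) =====
-- stated objective: alternative
-- what changed: Replaced the in_block boolean state machine with a shared-iterator nested loop: on a start marker B appends the placeholder and runs an inner loop that drains lines until the end marker, removing the boolean flag entirely.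
import Mathlib
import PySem

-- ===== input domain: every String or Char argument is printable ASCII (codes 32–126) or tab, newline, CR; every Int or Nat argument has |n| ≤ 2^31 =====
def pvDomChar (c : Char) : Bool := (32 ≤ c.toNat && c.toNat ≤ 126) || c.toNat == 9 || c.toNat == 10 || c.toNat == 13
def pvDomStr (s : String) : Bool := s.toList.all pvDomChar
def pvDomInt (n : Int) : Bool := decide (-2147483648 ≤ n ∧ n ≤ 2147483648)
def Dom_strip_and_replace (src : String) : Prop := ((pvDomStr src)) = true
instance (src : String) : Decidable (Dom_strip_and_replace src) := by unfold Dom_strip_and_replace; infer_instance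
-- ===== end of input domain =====

-- B replaces A's in_block boolean state machine by a nested drain-until-end-marker loop
-- over the shared line iterator (alternative decomposition, same linear cost).

-- shared helpers: the module constants, and splitlines(keepends=True) ported by hand
-- (exact on the Dom alphabet, whose only line separators are '\n', '\r' and '\r\n').
def pvMarkStart : List Char := "### begin-solution".toList
def pvMarkEnd : List Char := "### end-solution".toList
def pvPlaceholder : List Char := "#your code/answer\n".toList

def pvSplitKeep : List Char → List (List Char)
  | [] => []
  | '\n' :: rest => ['\n'] :: pvSplitKeep rest
  | '\r' :: '\n' :: rest => ['\r', '\n'] :: pvSplitKeep rest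
  | '\r' :: rest => ['\r'] :: pvSplitKeep rest
  | c :: rest =>
    match pvSplitKeep rest with
    | [] => [[c]]
    | l :: ls => (c :: l) :: ls

-- ===== PORT A =====
def strip_and_replace (src : String) : String :=
  String.ofList (PySem.Chars.join []
    ((pvSplitKeep src.toList).foldl
      (fun (st : Bool × List (List Char)) line =>
        if !st.1 && PySem.Chars.isIn pvMarkStart line then (true, st.2 ++ [pvPlaceholder])
        else if st.1 && PySem.Chars.isIn pvMarkEnd line then (false, st.2)
        else if !st.1 then (st.1, st.2 ++ [line])
        else st)
      (false, [])).2)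

-- ===== PORT B =====
-- inner loop: consume lines from the iterator until one contains MARK_END
def pvDrain : List (List Char) → List (List Char)
  | [] => []
  | l :: rest => if PySem.Chars.isIn pvMarkEnd l then rest else pvDrain rest

theorem pvDrain_length_le (ls : List (List Char)) : (pvDrain ls).length ≤ ls.length := by
  induction ls with
  | nil => simp [pvDrain]
  | cons l rest ih =>
    simp only [pvDrain]
    split
    · simp
    · exact Nat.le_succ_of_le ih

-- outer loop over the shared iterator
def pvGo : List (List Char) → List (List Char)
  | [] => []
  | l :: rest =>
    if PySem.Chars.isIn pvMarkStart l then pvPlaceholder :: pvGo (pvDrain rest)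
    else l :: pvGo rest
  termination_by ls => ls.length
  decreasing_by
  · exact Nat.lt_succ_of_le (pvDrain_length_le rest)
  · simp

def strip_and_replace_alt (src : String) : String :=
  String.ofList (PySem.Chars.join [] (pvGo (pvSplitKeep src.toList)))

-- ===== PRECONDITION & SPEC =====
def Spec_strip_and_replace (src : String) (out : String) : Prop := out = strip_and_replace_alt src
instance (src : String) (out : String) : Decidable (Spec_strip_and_replace src out) := by unfold Spec_strip_and_replace; infer_instance

-- ===== CLAIM (what is proved, stated in full; the proofs are below) =====
def Claim_equal_strip_and_replace : Prop := ∀ (src : String), Dom_strip_and_replace src → Spec_strip_and_replace src (strip_and_replace src)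

-- ===== LEMMAS AND PROOFS =====
theorem pv_fold_go (ls : List (List Char)) :
    ∀ acc : List (List Char),
      ((ls.foldl
        (fun (st : Bool × List (List Char)) line =>
          if !st.1 && PySem.Chars.isIn pvMarkStart line then (true, st.2 ++ [pvPlaceholder])
          else if st.1 && PySem.Chars.isIn pvMarkEnd line then (false, st.2)
          else if !st.1 then (st.1, st.2 ++ [line])
          else st)
        (false, acc)).2 = acc ++ pvGo ls)
    ∧
      ((ls.foldl
        (fun (st : Bool × List (List Char)) line =>
          if !st.1 && PySem.Chars.isIn pvMarkStart line then (true, st.2 ++ [pvPlaceholder])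
          else if st.1 && PySem.Chars.isIn pvMarkEnd line then (false, st.2)
          else if !st.1 then (st.1, st.2 ++ [line])
          else st)
        (true, acc)).2 = acc ++ pvGo (pvDrain ls)) := by
  induction ls with
  | nil => intro acc; simp [pvGo, pvDrain]
  | cons l rest ih =>
    intro acc
    by_cases hs : PySem.Chars.isIn pvMarkStart l = true
    · refine ⟨?_, ?_⟩
      · simp only [List.foldl_cons, Bool.not_false, Bool.true_and, hs, if_pos]
        rw [(ih (acc ++ [pvPlaceholder])).2]
        simp [pvGo, hs]
      · by_cases he : PySem.Chars.isIn pvMarkEnd l = true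
        · simp only [List.foldl_cons, Bool.not_true, Bool.false_and, Bool.false_eq_true,
            if_false, he, Bool.true_and, if_pos]
          rw [(ih acc).1]
          simp [pvDrain, he]
        · simp only [List.foldl_cons, Bool.not_true, Bool.false_and, Bool.false_eq_true,
            if_false, he, Bool.and_false]
          rw [(ih acc).2]
          simp [pvDrain, he]
    · refine ⟨?_, ?_⟩
      · simp only [List.foldl_cons, Bool.not_false, Bool.true_and, hs, Bool.false_and,
          Bool.false_eq_true, if_false, Bool.not_false, if_true]
        rw [(ih (acc ++ [l])).1]
        simp [pvGo, hs]
      · by_cases he : PySem.Chars.isIn pvMarkEnd l = true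
        · simp only [List.foldl_cons, Bool.not_true, Bool.false_and, Bool.false_eq_true,
            if_false, he, Bool.true_and, if_pos]
          rw [(ih acc).1]
          simp [pvDrain, he]
        · simp only [List.foldl_cons, Bool.not_true, Bool.false_and, Bool.false_eq_true,
            if_false, he, Bool.and_false]
          rw [(ih acc).2]
          simp [pvDrain, he]

-- ===== VERDICT (by name: the statement is the Claim_ definition above) =====
theorem strip_and_replace_spec : Claim_equal_strip_and_replace := by
  intro src _
  unfold Spec_strip_and_replace strip_and_replace strip_and_replace_alt
  rw [(pv_fold_go (pvSplitKeep src.toList) []).1]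
  simp
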